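-- pv_equiv track=rewrite | github.com/bmarinaleonteva94-code/web-python-module-1 | module-4/homework/task_2.py | count_cows_bulls
-- ===== SOURCE A (Python) =====
-- def count_cows_bulls(secret, guess):
--     cows = 0
--     bulls = 0
--     remaining_secret = {}
--     remaining_guess = {}
--     for i in range(4):
--         if guess[i] == secret[i]:
--             cows += 1
--         else:
--             remaining_secret.setdefault(secret[i], 0)
--             remaining_secret[secret[i]] += 1
--
--             remaining_guess.setdefault(guess[i], 0)
--             remaining_guess[guess[i]] += 1
--     for key in remaining_guess.keys():
--         if key in remaining_secret:
--             bulls += min(remaining_guess[key], remaining_secret[key])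
--
--     return cows, bulls
-- ===== SOURCE B (Python) =====
-- def count_cows_bulls(secret, guess):
--     cows = sum(1 for i in range(4) if secret[i] == guess[i])
--     pool = list(secret[:4])
--     hits = 0
--     for ch in guess[:4]:
--         if ch in pool:
--             pool.remove(ch)
--             hits += 1
--     return cows, hits - cows
-- ===== Notes on version B (the rewrite author's own statement) =====
-- stated objective: alternative
-- what changed: B replaces A's frequency-dict bucketing and min-of-counts sum by a greedy multiset-matching pass: it counts exact matches first, then walks the guess removing each found character from a mutable pool list of secret characters, and returns hits minus cows.
import Mathlib
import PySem

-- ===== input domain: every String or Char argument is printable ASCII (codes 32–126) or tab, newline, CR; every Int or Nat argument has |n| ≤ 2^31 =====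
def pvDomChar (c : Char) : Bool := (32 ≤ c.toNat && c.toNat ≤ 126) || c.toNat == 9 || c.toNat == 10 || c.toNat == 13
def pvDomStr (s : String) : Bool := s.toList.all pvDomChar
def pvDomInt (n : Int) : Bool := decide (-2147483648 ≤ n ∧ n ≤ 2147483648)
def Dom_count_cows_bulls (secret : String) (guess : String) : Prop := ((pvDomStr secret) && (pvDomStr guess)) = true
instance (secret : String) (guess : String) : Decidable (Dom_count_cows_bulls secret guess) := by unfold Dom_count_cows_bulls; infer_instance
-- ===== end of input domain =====

-- B drops A's frequency dicts entirely: it counts exact matches in one pass, then greedily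
-- matches guess characters against a mutable pool list of secret characters (remove on hit)
-- and returns (cows, hits - cows); same return value wherever A returns (alternative, not faster).

-- ===== PORT A =====
def count_cows_bulls (secret : String) (guess : String) : Int × Int :=
  let S := secret.toList
  let G := guess.toList
  -- for i in range(4): if guess[i] == secret[i]: cows += 1 else: bucket mismatched chars
  let st := (PySem.List.pyRange 0 4 1).foldl
    (fun (st : Int × PySem.Dict Char Int × PySem.Dict Char Int) i =>
      let s := PySem.List.pyGetD S i ' '
      let g := PySem.List.pyGetD G i ' '
      if g == s then (st.1 + 1, st.2.1, st.2.2)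
      else (st.1,
            (st.2.1.setdefault s 0).insert s ((st.2.1.setdefault s 0).getD s 0 + 1),
            (st.2.2.setdefault g 0).insert g ((st.2.2.setdefault g 0).getD g 0 + 1)))
    (0, PySem.Dict.empty, PySem.Dict.empty)
  -- for key in remaining_guess.keys(): if key in remaining_secret: bulls += min(...)
  let bulls := st.2.2.keys.foldl
    (fun b k => if st.2.1.contains k then b + min (st.2.2.getD k 0) (st.2.1.getD k 0) else b) 0
  (st.1, bulls)

-- ===== PORT B =====
def count_cows_bulls_alt (secret : String) (guess : String) : Int × Int :=
  let S := secret.toList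
  let G := guess.toList
  -- cows = sum(1 for i in range(4) if secret[i] == guess[i])
  let cows := (PySem.List.pyRange 0 4 1).foldl
    (fun (c : Int) i =>
      if PySem.List.pyGetD S i ' ' == PySem.List.pyGetD G i ' ' then c + 1 else c) 0
  -- pool = list(secret[:4]); for ch in guess[:4]: if ch in pool: pool.remove(ch); hits += 1
  -- (remove? is guarded by the membership test, so the .getD default is never taken)
  let st := (PySem.List.slice G none (some 4)).foldl
    (fun (st : List Char × Int) ch =>
      if st.1.contains ch then ((PySem.List.remove? st.1 ch).getD st.1, st.2 + 1) else st)
    (PySem.List.slice S none (some 4), 0)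
  (cows, st.2 - cows)

-- ===== PRECONDITION & SPEC =====
-- Pre_ excludes exactly the inputs where A raises IndexError: a secret or guess shorter than 4 characters.
def Pre_count_cows_bulls (secret : String) (guess : String) : Prop :=
  4 ≤ secret.toList.length ∧ 4 ≤ guess.toList.length
instance (secret : String) (guess : String) : Decidable (Pre_count_cows_bulls secret guess) := by unfold Pre_count_cows_bulls; infer_instance
def pvWitness_count_cows_bulls : String × String := ("1234", "1243")

def Spec_count_cows_bulls (secret : String) (guess : String) (out : Int × Int) : Prop := out = count_cows_bulls_alt secret guess
instance (secret : String) (guess : String) (out : Int × Int) : Decidable (Spec_count_cows_bulls secret guess out) := by unfold Spec_count_cows_bulls; infer_instance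

-- ===== CLAIM (what is proved, stated in full; the proofs are below) =====
def Claim_equal_count_cows_bulls : Prop := ∀ (secret : String) (guess : String), Dom_count_cows_bulls secret guess → Pre_count_cows_bulls secret guess → Spec_count_cows_bulls secret guess (count_cows_bulls secret guess)

-- ===== LEMMAS AND PROOFS =====

theorem pv_countP_split (l : List (Char × Char)) (p q : Char × Char → Bool) :
    l.countP p = (l.filter q).countP p + (l.filter (fun a => !q a)).countP p := by
  induction l with
  | nil => simp
  | cons a t ih =>
    by_cases h : q a = true <;> by_cases h2 : p a = true <;>
      simp [h, h2, ih] <;> omega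

theorem pv_sum_count (l : List Char) (T : Finset Char) (h : l.toFinset ⊆ T) :
    ∑ k ∈ T, l.count k = l.length := by
  rw [← List.sum_toFinset_count_eq_length l]
  exact (Finset.sum_subset h (fun k _ hk => List.count_eq_zero.mpr (fun hm => hk (List.mem_toFinset.mpr hm)))).symm

-- sum of a function over the distinct elements = sum over a superset finset, if f vanishes off the list
theorem pv_sum_ofList (l : List Char) (f : Char → Int) (T : Finset Char)
    (hT : l.toFinset ⊆ T) (hz : ∀ k ∈ T, k ∉ l → f k = 0) :
    ((PySem.Set.ofList l).map f).sum = ∑ k ∈ T, f k := by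
  have hnd : (PySem.Set.ofList l : List Char).Nodup := PySem.Set.nodup_ofList l
  rw [← List.sum_toFinset f hnd]
  apply Finset.sum_subset
  · intro k hk
    apply hT
    simp only [List.mem_toFinset] at *
    exact (PySem.Set.mem_ofList l k).mp hk
  · intro k hk hnk
    exact hz k hk (fun hm => hnk (List.mem_toFinset.mpr ((PySem.Set.mem_ofList l k).mpr hm)))

-- greedy pool-removal loop counts the multiset intersection of guess and pool
theorem pv_greedy (G : List Char) (S : List Char) (n : Int) :
    (G.foldl
      (fun (st : List Char × Int) ch =>
        if st.1.contains ch then ((PySem.List.remove? st.1 ch).getD st.1, st.2 + 1) else st)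
      (S, n)).2
    = n + ((((G : List Char) : Multiset Char) ∩ ((S : List Char) : Multiset Char)).card : Int) := by
  induction G generalizing S n with
  | nil => simp
  | cons ch G' ih =>
    by_cases h : ch ∈ S
    · have hc : S.contains ch = true := by simpa using h
      rw [List.foldl_cons]
      simp only [hc, if_pos]
      rw [PySem.List.remove?_eq_some_erase S ch h, Option.getD_some, ih]
      rw [← Multiset.cons_coe, Multiset.cons_inter_of_pos _ (by simpa using h)]
      simp [← Multiset.coe_erase]
      ring
    · have hc : S.contains ch = false := by simpa using h
      rw [List.foldl_cons]
      simp only [hc, Bool.false_eq_true, if_false]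
      rw [ih, ← Multiset.cons_coe, Multiset.cons_inter_of_neg _ (by simpa using h)]

-- multiset intersection cardinality = sum of min counts over the distinct guess characters
theorem pv_inter_card (G S : List Char) :
    ((((G : List Char) : Multiset Char) ∩ ((S : List Char) : Multiset Char)).card)
    = ∑ k ∈ G.toFinset, min (G.count k) (S.count k) := by
  have h1 : (((G : Multiset Char) ∩ (S : Multiset Char)).toFinset) ⊆ G.toFinset := by
    intro k hk
    rw [Multiset.mem_toFinset] at hk
    have := (Multiset.mem_inter.mp hk).1
    exact List.mem_toFinset.mpr (by simpa using this)
  rw [← Multiset.toFinset_sum_count_eq ((G : Multiset Char) ∩ (S : Multiset Char))]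
  rw [Finset.sum_subset h1 (fun k _ hk =>
    Multiset.count_eq_zero.mpr (fun hm => hk (Multiset.mem_toFinset.mpr hm)))]
  apply Finset.sum_congr rfl
  intro k _
  rw [Multiset.count_inter]
  simp

-- Bulls-and-Cows identity: common count minus exact matches = A's bulls over mismatched buckets
theorem pv_key (P : List (Char × Char)) :
    (((((P.map Prod.snd) : List Char) : Multiset Char) ∩ (((P.map Prod.fst) : List Char) : Multiset Char)).card : Int)
    - (P.countP (fun p => p.1 == p.2) : Int)
    = ((PySem.Set.ofList ((P.filter (fun p => !(p.2 == p.1))).map Prod.snd)).map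
        (fun k => if ((P.filter (fun p => !(p.2 == p.1))).map Prod.fst).contains k
                  then min ((((P.filter (fun p => !(p.2 == p.1))).map Prod.snd).count k : Int))
                           (((P.filter (fun p => !(p.2 == p.1))).map Prod.fst).count k)
                  else 0)).sum := by
  set q : Char × Char → Bool := fun p => p.2 == p.1 with hq
  set E := P.filter q with hE
  set M := P.filter (fun p => !q p) with hM
  set T := (P.map Prod.snd).toFinset with hT
  -- pointwise count decompositions
  have hGc : ∀ k, (P.map Prod.snd).count k = (E.map Prod.snd).count k + (M.map Prod.snd).count k := by
    intro k
    simp only [List.count_eq_countP, List.countP_map]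
    exact pv_countP_split P _ q
  have hEfst : ∀ k, (E.map Prod.fst).count k = (E.map Prod.snd).count k := by
    intro k
    simp only [List.count_eq_countP, List.countP_map]
    apply List.countP_congr
    intro a ha
    have : q a = true := List.of_mem_filter ha
    have h2 : a.2 = a.1 := by simpa [hq] using this
    simp [Function.comp, h2]
  have hSc : ∀ k, (P.map Prod.fst).count k = (E.map Prod.snd).count k + (M.map Prod.fst).count k := by
    intro k
    simp only [List.count_eq_countP, List.countP_map]
    rw [pv_countP_split P ((fun x => x == k) ∘ Prod.fst) q]
    have := hEfst k
    simp only [List.count_eq_countP, List.countP_map] at this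
    simp only [← hE, ← hM]
    omega
  -- LHS: intersection card as a sum of mins over T
  rw [pv_inter_card]
  -- RHS sum over T
  have hsubM : (M.map Prod.snd).toFinset ⊆ T := by
    intro k hk
    rw [List.mem_toFinset] at hk ⊢
    obtain ⟨a, ha, rfl⟩ := List.mem_map.mp hk
    exact List.mem_map.mpr ⟨a, List.mem_of_mem_filter ha, rfl⟩
  have hz2 : ∀ k ∈ T, k ∉ M.map Prod.snd →
      (if (M.map Prod.fst).contains k
       then min (((M.map Prod.snd).count k : Int)) ((M.map Prod.fst).count k)
       else 0) = 0 := by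
    intro k _ hk
    rw [List.count_eq_zero.mpr hk]
    split <;> simp
  rw [pv_sum_ofList (M.map Prod.snd) _ T hsubM hz2]
  -- drop the contains-guard pointwise
  have hguard : ∀ k ∈ T,
      (if (M.map Prod.fst).contains k
       then min (((M.map Prod.snd).count k : Int)) ((M.map Prod.fst).count k)
       else 0)
      = min (((M.map Prod.snd).count k : Int)) ((M.map Prod.fst).count k) := by
    intro k _
    split
    · rfl
    · next h =>
      have h0 : (M.map Prod.fst).count k = 0 :=
        List.count_eq_zero.mpr (by simpa using h)
      rw [h0]
      simp
  rw [Finset.sum_congr rfl hguard]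
  -- cows is the number of matched positions
  have hcows : (P.countP fun p => p.1 == p.2) = E.length := by
    rw [hE, ← List.countP_eq_length_filter]
    apply List.countP_congr
    intro a _
    simp only [hq]
    rw [@Bool.beq_comm Char _ _ a.2 a.1]
  -- pointwise Bulls-and-Cows identity, then sum
  have hpt : ∀ k ∈ T,
      ((min ((P.map Prod.snd).count k) ((P.map Prod.fst).count k) : ℕ) : Int)
      = ((E.map Prod.snd).count k : Int)
        + min (((M.map Prod.snd).count k : Int)) ((M.map Prod.fst).count k) := by
    intro k _
    have h1 := hGc k
    have h2 := hSc k
    push_cast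
    omega
  rw [Nat.cast_sum, Finset.sum_congr rfl hpt, Finset.sum_add_distrib]
  have hsubE : (E.map Prod.snd).toFinset ⊆ T := by
    intro k hk
    rw [List.mem_toFinset] at hk ⊢
    obtain ⟨a, ha, rfl⟩ := List.mem_map.mp hk
    exact List.mem_map.mpr ⟨a, List.mem_of_mem_filter ha, rfl⟩
  have hsum : ∑ k ∈ T, ((E.map Prod.snd).count k : Int) = (E.length : Int) := by
    rw [← Nat.cast_sum]
    rw [pv_sum_count (E.map Prod.snd) T hsubE]
    simp
  rw [hsum, hcows]
  ring

-- A's setdefault-then-increment is exactly d[k] = d.get(k, 0) + 1, i.e. Dict.modify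
theorem pv_bump_eq_modify (d : PySem.Dict Char Int) (k : Char) :
    (d.setdefault k 0).insert k ((d.setdefault k 0).getD k 0 + 1) = d.modify k 0 (· + 1) := by
  by_cases h : d.contains k = true
  · rw [PySem.Dict.setdefault_of_contains d 0 h]; rfl
  · rw [PySem.Dict.setdefault_of_not_contains d 0 (by simpa using h)]
    show (d.insert k 0).insert k ((d.insert k 0).getD k 0 + 1) = d.insert k (d.getD k 0 + 1)
    rw [PySem.Dict.insert_insert_self, PySem.Dict.getD_insert_self,
        PySem.Dict.getD_of_not_contains d (d0 := 0) (by simpa using h)]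

-- the indexed range(4) loop is a fold over the zipped first four characters
theorem pv_fold4 {σ : Type} (f : σ → Char → Char → σ) (init : σ)
    (s0 s1 s2 s3 : Char) (S' : List Char) (g0 g1 g2 g3 : Char) (G' : List Char) :
    (PySem.List.pyRange 0 4 1).foldl
      (fun st i => f st (PySem.List.pyGetD (s0::s1::s2::s3::S') i ' ')
                        (PySem.List.pyGetD (g0::g1::g2::g3::G') i ' ')) init
    = [(s0,g0),(s1,g1),(s2,g2),(s3,g3)].foldl (fun st p => f st p.1 p.2) init := by
  have hr : PySem.List.pyRange 0 4 1 = [0,1,2,3] := by decide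
  rw [hr]
  simp [List.foldl, PySem.List.pyGetD_ofNat']

-- A's loop closed form: cows, plus the two counters of the mismatched positions
theorem pv_foldA (P : List (Char × Char)) (c : Int) (ds dg : PySem.Dict Char Int) :
    P.foldl
      (fun (st : Int × PySem.Dict Char Int × PySem.Dict Char Int) p =>
        if p.2 == p.1 then (st.1 + 1, st.2.1, st.2.2)
        else (st.1,
              (st.2.1.setdefault p.1 0).insert p.1 ((st.2.1.setdefault p.1 0).getD p.1 0 + 1),
              (st.2.2.setdefault p.2 0).insert p.2 ((st.2.2.setdefault p.2 0).getD p.2 0 + 1)))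
      (c, ds, dg)
    = (c + (P.countP (fun p => p.2 == p.1) : Int),
       ((P.filter (fun p => !(p.2 == p.1))).map Prod.fst).foldl (fun d x => d.modify x 0 (· + 1)) ds,
       ((P.filter (fun p => !(p.2 == p.1))).map Prod.snd).foldl (fun d x => d.modify x 0 (· + 1)) dg) := by
  induction P generalizing c ds dg with
  | nil => simp
  | cons p t ih =>
    by_cases h : (p.2 == p.1) = true
    · simp only [List.foldl_cons, h, if_pos, List.countP_cons, List.filter_cons]
      rw [ih]
      simp
      ring
    · simp only [List.foldl_cons, h, if_neg, List.countP_cons, List.filter_cons, Bool.not_eq_true] at *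
      rw [ih]
      simp [pv_bump_eq_modify]

-- B's cows loop closed form: count of matched positions
theorem pv_fold_cows (P : List (Char × Char)) (c : Int) :
    P.foldl (fun (c : Int) p => if p.1 == p.2 then c + 1 else c) c
    = c + (P.countP (fun p => p.1 == p.2) : Int) := by
  induction P generalizing c with
  | nil => simp
  | cons p t ih =>
    rw [List.foldl_cons, ih, List.countP_cons]
    by_cases h : (p.1 == p.2) = true <;> simp [h] <;> push_cast <;> ring

-- a guarded accumulating loop is a sum
theorem pv_foldl_guard_sum (L : List Char) (q : Char → Bool) (t : Char → Int) (a : Int) :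
    L.foldl (fun b k => if q k then b + t k else b) a
    = a + (L.map (fun k => if q k then t k else 0)).sum := by
  induction L generalizing a with
  | nil => simp
  | cons x xs ih =>
    by_cases h : q x = true <;> simp [h, ih] <;> try ring

-- the two cow tests (g == s vs s == g) count the same positions
theorem pv_countP_comm (P : List (Char × Char)) :
    P.countP (fun p => p.2 == p.1) = P.countP (fun p => p.1 == p.2) := by
  apply List.countP_congr
  intro a _
  rw [@Bool.beq_comm Char _ _ a.2 a.1]

-- strings admitted by Pre_ start with four characters
theorem pv_four {l : List Char} (h : 4 ≤ l.length) : ∃ a b c d t, l = a::b::c::d::t := by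
  match l, h with
  | a::b::c::d::t, _ => exact ⟨a, b, c, d, t, rfl⟩

-- secret[:4] / guess[:4] on a list with four leading characters
theorem pv_slice4 (a b c d : Char) (t : List Char) :
    PySem.List.slice (a::b::c::d::t) none (some 4) = [a, b, c, d] := by
  rw [PySem.List.slice_to _ (by norm_num)]
  rfl

-- ===== VERDICT (by name: the statement is the Claim_ definition above) =====
theorem count_cows_bulls_spec : Claim_equal_count_cows_bulls := by
  intro secret guess _ hP
  obtain ⟨s0, s1, s2, s3, S', hS⟩ := pv_four hP.1
  obtain ⟨g0, g1, g2, g3, G', hG⟩ := pv_four hP.2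
  show count_cows_bulls secret guess = count_cows_bulls_alt secret guess
  simp only [count_cows_bulls, count_cows_bulls_alt, hS, hG]
  rw [pv_fold4 (f := fun (st : Int × PySem.Dict Char Int × PySem.Dict Char Int) s g =>
        if g == s then (st.1 + 1, st.2.1, st.2.2)
        else (st.1,
              (st.2.1.setdefault s 0).insert s ((st.2.1.setdefault s 0).getD s 0 + 1),
              (st.2.2.setdefault g 0).insert g ((st.2.2.setdefault g 0).getD g 0 + 1)))]
  rw [pv_fold4 (f := fun (c : Int) s g => if s == g then c + 1 else c)]
  rw [pv_foldA, pv_fold_cows, pv_slice4, pv_slice4, pv_greedy]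
  rw [← PySem.Dict.counter_eq_foldl, ← PySem.Dict.counter_eq_foldl]
  simp only [PySem.Dict.keys_counter, PySem.Dict.contains_counter, PySem.Dict.getD_counter]
  rw [pv_foldl_guard_sum]
  have hkey := pv_key [(s0,g0),(s1,g1),(s2,g2),(s3,g3)]
  simp only [List.map_cons, List.map_nil] at hkey
  rw [Prod.mk.injEq]
  refine ⟨by rw [pv_countP_comm], ?_⟩
  dsimp only
  omega
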